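-- pv_equiv track=rewrite | github.com/RasmusKRiis/nf-core-sars | bin/primer_metrics.py | mismatch_metrics
-- ===== SOURCE A (Python) =====
-- from typing import Dict, List, Tuple
--
-- AMBIGUITY_CODES = {
--     "A": {"A"},
--     "C": {"C"},
--     "G": {"G"},
--     "T": {"T"},
--     "U": {"T"},
--     "R": {"A", "G"},
--     "Y": {"C", "T"},
--     "S": {"G", "C"},
--     "W": {"A", "T"},
--     "K": {"G", "T"},
--     "M": {"A", "C"},
--     "B": {"C", "G", "T"},
--     "D": {"A", "G", "T"},
--     "H": {"A", "C", "T"},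
--     "V": {"A", "C", "G"},
--     "N": {"A", "C", "G", "T"},
-- }
--
-- def bases_match(primer_base: str, template_base: str) -> bool:
--     """
--     Compare primer and template bases with IUPAC support.
--     Unknown template bases should be penalized: treating template N as a match can
--     produce false "perfect" hits in low-quality/ambiguous regions.
--     """
--     t_base = template_base.upper()
--     if t_base == "N" or t_base == "-":
--         return False
--     p_set = AMBIGUITY_CODES.get(primer_base.upper(), {primer_base.upper()})
--     t_set = AMBIGUITY_CODES.get(t_base, {t_base})
--     return bool(p_set & t_set)
--
-- def mismatch_metrics(primer_seq: str, template_seq: str) -> Tuple[int, List[int]]: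
--     mismatches = []
--     for idx, (a, b) in enumerate(zip(primer_seq, template_seq), start=1):
--         if not bases_match(a, b):
--             mismatches.append(idx)
--     if len(template_seq) < len(primer_seq):
--         span = range(len(template_seq) + 1, len(primer_seq) + 1)
--         mismatches.extend(span)
--     return len(mismatches), mismatches
-- ===== SOURCE B (Python) =====
-- from typing import List, Tuple
--
-- AMBIGUITY_CODES = {
--     "A": {"A"}, "C": {"C"}, "G": {"G"}, "T": {"T"}, "U": {"T"},
--     "R": {"A", "G"}, "Y": {"C", "T"}, "S": {"G", "C"}, "W": {"A", "T"},
--     "K": {"G", "T"}, "M": {"A", "C"}, "B": {"C", "G", "T"},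
--     "D": {"A", "G", "T"}, "H": {"A", "C", "T"}, "V": {"A", "C", "G"},
--     "N": {"A", "C", "G", "T"},
-- }
--
-- def bases_match(primer_base: str, template_base: str) -> bool:
--     t_base = template_base.upper()
--     if t_base == "N" or t_base == "-":
--         return False
--     p_set = AMBIGUITY_CODES.get(primer_base.upper(), {primer_base.upper()})
--     t_set = AMBIGUITY_CODES.get(t_base, {t_base})
--     return bool(p_set & t_set)
--
-- def mismatch_metrics(primer_seq: str, template_seq: str) -> Tuple[int, List[int]]:
--     # One pass over the primer, drawing template bases lazily: when the template
--     # runs out, the sentinel '-' (which never matches) stands in -- no separate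
--     # tail step.
--     mismatches: List[int] = []
--     templ = iter(template_seq)
--     for idx, p in enumerate(primer_seq, start=1):
--         tb = next(templ, "-")
--         if not bases_match(p, tb):
--             mismatches.append(idx)
--     return len(mismatches), mismatches
-- ===== Notes on version B (the rewrite author's own statement) =====
-- stated objective: simpler
-- what changed: Replaces A's two-phase structure (zip-scan over the overlap plus a separate range-extend for the primer tail) with one pass over the primer that draws template bases lazily (next with default), substituting the sentinel '-' (a guaranteed mismatch) once the template is exhausted.
import Mathlib
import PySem

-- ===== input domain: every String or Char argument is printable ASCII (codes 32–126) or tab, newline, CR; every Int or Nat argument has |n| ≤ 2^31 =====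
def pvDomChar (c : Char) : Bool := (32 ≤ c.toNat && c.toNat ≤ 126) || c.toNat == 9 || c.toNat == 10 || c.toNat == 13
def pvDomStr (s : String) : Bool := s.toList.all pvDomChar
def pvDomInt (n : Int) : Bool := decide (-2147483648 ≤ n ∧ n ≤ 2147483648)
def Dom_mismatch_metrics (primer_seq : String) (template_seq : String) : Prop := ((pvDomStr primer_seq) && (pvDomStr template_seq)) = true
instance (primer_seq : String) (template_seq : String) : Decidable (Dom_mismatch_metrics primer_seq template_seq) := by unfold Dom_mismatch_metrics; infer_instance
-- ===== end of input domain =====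

-- B folds A's separate tail range-extend into one recursion over the primer using the sentinel '-' (objective: simpler).

-- ===== PORT A =====
-- AMBIGUITY_CODES.get(c, {c}) : the IUPAC base set of c (default {c}); sets of ASCII chars, ported as distinct-element lists
def pvAmb (c : Char) : List Char :=
  if c = 'A' then ['A'] else if c = 'C' then ['C'] else if c = 'G' then ['G'] else
  if c = 'T' then ['T'] else if c = 'U' then ['T'] else
  if c = 'R' then ['A', 'G'] else if c = 'Y' then ['C', 'T'] else
  if c = 'S' then ['G', 'C'] else if c = 'W' then ['A', 'T'] else
  if c = 'K' then ['G', 'T'] else if c = 'M' then ['A', 'C'] else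
  if c = 'B' then ['C', 'G', 'T'] else if c = 'D' then ['A', 'G', 'T'] else
  if c = 'H' then ['A', 'C', 'T'] else if c = 'V' then ['A', 'C', 'G'] else
  if c = 'N' then ['A', 'C', 'G', 'T'] else [c]

-- bases_match; bool(p_set & t_set) = the intersection is nonempty
def pvBasesMatch (primer_base : Char) (template_base : Char) : Bool :=
  let tU := PySem.Chars.upperChar template_base
  if tU = 'N' ∨ tU = '-' then false
  else
    let pSet := pvAmb (PySem.Chars.upperChar primer_base)
    let tSet := pvAmb tU
    pSet.any (fun x => tSet.contains x)

-- the `for idx, (a, b) in enumerate(zip(...), start=1)` loop, appending idx on mismatch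
def pvScanA (ps : List Char) (ts : List Char) (i : Int) : List Int :=
  match ps, ts with
  | a :: ps', b :: ts' =>
      if !pvBasesMatch a b then i :: pvScanA ps' ts' (i + 1) else pvScanA ps' ts' (i + 1)
  | _, _ => []

def mismatch_metrics (primer_seq : String) (template_seq : String) : Int × List Int :=
  let p := primer_seq.toList
  let t := template_seq.toList
  let mismatches := pvScanA p t 1
  let mismatches :=
    if t.length < p.length then
      mismatches ++ PySem.List.pyRange ((t.length : Int) + 1) ((p.length : Int) + 1) 1
    else mismatches
  ((mismatches.length : Int), mismatches)

-- ===== PORT B =====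
-- the enumerate loop over the primer drawing template bases lazily (next(templ, '-')):
-- head-or-sentinel, then the tail; appends idx to the accumulator on mismatch
def pvGoB (ps : List Char) (ts : List Char) (i : Int) (mismatches : List Int) : List Int :=
  match ps with
  | [] => mismatches
  | a :: ps' =>
      let tb := match ts with | [] => '-' | c :: _ => c
      let mismatches' := if !pvBasesMatch a tb then mismatches ++ [i] else mismatches
      pvGoB ps' (ts.drop 1) (i + 1) mismatches'

def mismatch_metrics_alt (primer_seq : String) (template_seq : String) : Int × List Int :=
  let mismatches := pvGoB primer_seq.toList template_seq.toList 1 []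
  ((mismatches.length : Int), mismatches)

-- ===== PRECONDITION & SPEC =====
def Spec_mismatch_metrics (primer_seq : String) (template_seq : String) (out : Int × List Int) : Prop := out = mismatch_metrics_alt primer_seq template_seq
instance (primer_seq : String) (template_seq : String) (out : Int × List Int) : Decidable (Spec_mismatch_metrics primer_seq template_seq out) := by unfold Spec_mismatch_metrics; infer_instance

-- ===== CLAIM (what is proved, stated in full; the proofs are below) =====
def Claim_equal_mismatch_metrics : Prop := ∀ (primer_seq : String) (template_seq : String), Dom_mismatch_metrics primer_seq template_seq → Spec_mismatch_metrics primer_seq template_seq (mismatch_metrics primer_seq template_seq)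

-- ===== LEMMAS AND PROOFS =====

-- the sentinel always mismatches
theorem pvBasesMatch_dash (a : Char) : pvBasesMatch a '-' = false := rfl

theorem pvScanA_nil (ps : List Char) (i : Int) : pvScanA ps [] i = [] := by
  cases ps <;> rfl

-- B's single recursion = A's zip-scan followed by the tail range
theorem pvGoB_eq (ps : List Char) : ∀ (ts : List Char) (i : Int) (acc : List Int),
    pvGoB ps ts i acc =
      acc ++ pvScanA ps ts i ++
        PySem.List.pyRange (i + (min ts.length ps.length : Nat)) (i + (ps.length : Nat)) 1 := by
  induction ps with
  | nil =>
      intro ts i acc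
      simp [pvGoB, pvScanA, PySem.List.pyRange_one_eq_nil]
  | cons a ps' ih =>
      intro ts i acc
      cases ts with
      | nil =>
          rw [pvGoB]
          simp only [pvBasesMatch_dash, Bool.not_false, if_true, List.drop_nil, ih, pvScanA_nil,
            List.append_nil, List.length_nil, List.length_cons, Nat.zero_min, Nat.cast_zero,
            add_zero, Nat.cast_add, Nat.cast_one]
          have e : i + ((ps'.length : Int) + 1) = i + 1 + (ps'.length : Int) := by ring
          have h2 : i < i + 1 + (ps'.length : Int) := by omega
          rw [e, PySem.List.pyRange_one_cons h2]
          simp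
      | cons b ts' =>
          rw [pvGoB]
          simp only [List.drop_succ_cons, List.drop_zero]
          rw [ih, pvScanA]
          have harg1 : i + 1 + (min ts'.length ps'.length : Nat)
              = i + (min (b :: ts').length (a :: ps').length : Nat) := by
            simp only [List.length_cons, Nat.succ_min_succ]
            push_cast
            ring
          have harg2 : i + 1 + (ps'.length : Nat) = i + ((a :: ps').length : Nat) := by
            simp only [List.length_cons]
            push_cast
            ring
          rw [harg1, harg2]
          cases h : pvBasesMatch a b <;>
            simp [h, List.append_assoc]

theorem mismatch_metrics_lists_eq (p t : List Char) :
    pvGoB p t 1 [] =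
      (if t.length < p.length then
        pvScanA p t 1 ++ PySem.List.pyRange ((t.length : Int) + 1) ((p.length : Int) + 1) 1
       else pvScanA p t 1) := by
  rw [pvGoB_eq, List.nil_append]
  by_cases h : t.length < p.length
  · rw [if_pos h, Nat.min_eq_left (Nat.le_of_lt h)]
    have e1 : (1 : Int) + (t.length : Nat) = (t.length : Int) + 1 := by ring
    have e2 : (1 : Int) + (p.length : Nat) = (p.length : Int) + 1 := by ring
    rw [e1, e2]
  · rw [if_neg h, Nat.min_eq_right (Nat.le_of_not_lt h),
      PySem.List.pyRange_one_eq_nil le_rfl, List.append_nil]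

-- ===== VERDICT (by name: the statement is the Claim_ definition above) =====
theorem mismatch_metrics_spec : Claim_equal_mismatch_metrics := by
  intro p t _
  unfold Spec_mismatch_metrics mismatch_metrics mismatch_metrics_alt
  rw [mismatch_metrics_lists_eq]
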